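-- pv_equiv track=rewrite | github.com/P0rtello/AdventOfCode2024 | Day2/main2.py | all_decreasing
-- ===== SOURCE A (Python) =====
-- def all_decreasing(numbers: list[int]) -> bool:
--     currentValue = numbers[0] + 1
--     for number in numbers:
--         if number < currentValue and abs(number - currentValue) <= 3:
--             currentValue = number
--         else:
--             return False
--     return True
-- ===== SOURCE B (Python) =====
-- def all_decreasing(numbers: list[int]) -> bool:
--     # Divide and conquer: a list is a valid strictly-decreasing run with steps in
--     # 1..3 iff both halves are valid and the pair straddling the split is valid.
--     # Each adjacent pair is the boundary of exactly one split, so this checks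
--     # exactly the adjacent-pair conditions, in a different (tree) order.
--     def ok(lo: int, hi: int) -> bool:
--         if hi - lo <= 1:
--             return True
--         mid = (lo + hi) // 2
--         return ok(lo, mid) and ok(mid, hi) and 1 <= numbers[mid - 1] - numbers[mid] <= 3
--     return ok(0, len(numbers))
-- ===== Notes on version B (the rewrite author's own statement) =====
-- stated objective: alternative
-- what changed: Replaces A's linear accumulator-threading scan (sentinel start numbers[0]+1, early return) with a divide-and-conquer checker: recursively validate both halves and the one adjacent pair straddling each split; Pre_ excludes the empty list, where A raises IndexError and B returns True.
-- outside the precondition, e.g. on all_decreasing([]): A raises IndexError, B returns True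
import Mathlib
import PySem

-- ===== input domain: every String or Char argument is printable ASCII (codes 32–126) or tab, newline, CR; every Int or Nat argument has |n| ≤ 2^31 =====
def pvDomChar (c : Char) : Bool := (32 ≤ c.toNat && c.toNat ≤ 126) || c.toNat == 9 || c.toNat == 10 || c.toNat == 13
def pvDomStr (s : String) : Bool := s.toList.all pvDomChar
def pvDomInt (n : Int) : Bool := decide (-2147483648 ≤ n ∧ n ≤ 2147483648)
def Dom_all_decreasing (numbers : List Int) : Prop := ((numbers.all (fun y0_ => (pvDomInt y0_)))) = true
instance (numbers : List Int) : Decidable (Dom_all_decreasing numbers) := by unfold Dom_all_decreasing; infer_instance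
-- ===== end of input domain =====

-- B replaces A's linear accumulator scan with a divide-and-conquer check of both halves plus the boundary pair at each split (alternative decomposition; same O(n) cost).


-- ===== PORT A =====
-- the for-loop with early return, threading currentValue
def all_decreasing_go (cur : Int) : List Int → Bool
  | [] => true
  | n :: rest =>
      if n < cur ∧ (n - cur).natAbs ≤ 3 then all_decreasing_go n rest else false

def all_decreasing (numbers : List Int) : Bool :=
  match PySem.List.pyGet? numbers 0 with
  | none => false   -- numbers[0] raises IndexError in Python; excluded by Pre_
  | some first => all_decreasing_go (first + 1) numbers

-- ===== PORT B =====
-- divide and conquer: ok(lo, hi) checks the segment numbers[lo:hi]; halves plus the boundary pair.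
-- numbers[mid-1] / numbers[mid] are always in range in reachable calls (0 ≤ lo < mid < hi ≤ len), so getD is exact there.
def all_decreasing_ok (numbers : List Int) (lo hi : Nat) : Bool :=
  if h : hi - lo ≤ 1 then true
  else
    let mid := (lo + hi) / 2
    all_decreasing_ok numbers lo mid && all_decreasing_ok numbers mid hi &&
      decide (1 ≤ numbers.getD (mid - 1) 0 - numbers.getD mid 0 ∧
              numbers.getD (mid - 1) 0 - numbers.getD mid 0 ≤ 3)
termination_by hi - lo
decreasing_by all_goals omega

def all_decreasing_alt (numbers : List Int) : Bool :=
  all_decreasing_ok numbers 0 numbers.length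

-- ===== PRECONDITION & SPEC =====
-- A raises IndexError on [] (numbers[0]), so Pre_ excludes the empty list.
def Pre_all_decreasing (numbers : List Int) : Prop := numbers ≠ []
instance (numbers : List Int) : Decidable (Pre_all_decreasing numbers) := by unfold Pre_all_decreasing; infer_instance
def pvWitness_all_decreasing : List Int := ([7, 5, 2])

def Spec_all_decreasing (numbers : List Int) (out : Bool) : Prop := out = all_decreasing_alt numbers
instance (numbers : List Int) (out : Bool) : Decidable (Spec_all_decreasing numbers out) := by unfold Spec_all_decreasing; infer_instance

-- ===== CLAIM (what is proved, stated in full; the proofs are below) =====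
def Claim_equal_all_decreasing : Prop := ∀ (numbers : List Int), Dom_all_decreasing numbers → Pre_all_decreasing numbers → Spec_all_decreasing numbers (all_decreasing numbers)

-- ===== LEMMAS AND PROOFS =====
-- the adjacent-pair condition at index i of l (shared characterisation of both ports)
def pairOK (l : List Int) (i : Nat) : Prop :=
  1 ≤ l.getD (i - 1) 0 - l.getD i 0 ∧ l.getD (i - 1) 0 - l.getD i 0 ≤ 3

theorem pairOK_cons (x : Int) (l : List Int) (j : Nat) :
    pairOK (x :: l) (j + 2) ↔ pairOK l (j + 1) := by
  simp [pairOK]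

-- A's loop starting at cur is the pairwise check over (cur :: xs)
theorem all_decreasing_go_eq (xs : List Int) : ∀ (cur : Int),
    all_decreasing_go cur xs
      = ((cur :: xs).zip xs).all (fun p => decide (1 ≤ p.1 - p.2 ∧ p.1 - p.2 ≤ 3)) := by
  induction xs with
  | nil => intro cur; simp [all_decreasing_go]
  | cons x xs ih =>
      intro cur
      simp only [all_decreasing_go, List.zip_cons_cons, List.all_cons, ih x]
      have hiff : (x < cur ∧ (x - cur).natAbs ≤ 3) ↔ (1 ≤ cur - x ∧ cur - x ≤ 3) := by omega
      by_cases h : 1 ≤ cur - x ∧ cur - x ≤ 3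
      · rw [if_pos (hiff.mpr h), decide_eq_true h, Bool.true_and]
      · rw [if_neg (fun hc => h (hiff.mp hc)), decide_eq_false h, Bool.false_and]

-- the pairwise-zip check is the indexed pairOK condition
theorem zip_all_iff (l : List Int) :
    (((l.zip l.tail).all (fun p => decide (1 ≤ p.1 - p.2 ∧ p.1 - p.2 ≤ 3))) = true)
      ↔ ∀ i, 0 < i → i < l.length → pairOK l i := by
  induction l with
  | nil => simp
  | cons x xs ih =>
      cases xs with
      | nil => simp; intro i h1 h2; omega
      | cons y ys =>
          simp only [List.tail_cons, List.zip_cons_cons, List.all_cons,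
            Bool.and_eq_true, decide_eq_true_iff] at ih ⊢
          rw [ih]
          constructor
          · rintro ⟨h1, h2⟩ i hi0 hin
            match i, hi0 with
            | 1, _ => exact ⟨by simpa using h1.1, by simpa using h1.2⟩
            | (j+2), _ =>
                exact (pairOK_cons x (y :: ys) j).mpr
                  (h2 (j+1) (by omega) (by simpa using hin))
          · intro h
            refine ⟨?_, fun i hi0 hin => ?_⟩
            · have := h 1 (by omega) (by simp)
              simpa [pairOK] using this
            · match i, hi0 with
              | (j+1), _ =>
                  exact (pairOK_cons x (y :: ys) j).mp
                    (h (j+2) (by omega) (by simpa using hin))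

-- the divide-and-conquer check is the same indexed condition
theorem ok_iff (l : List Int) : ∀ (n lo hi : Nat), hi - lo ≤ n →
    ((all_decreasing_ok l lo hi = true) ↔ ∀ i, lo < i → i < hi → pairOK l i) := by
  intro n
  induction n with
  | zero =>
      intro lo hi h
      rw [all_decreasing_ok]
      simp only [dif_pos (by omega : hi - lo ≤ 1)]
      constructor
      · intro _ i h1 h2; omega
      · intro _; trivial
  | succ n ih =>
      intro lo hi h
      rw [all_decreasing_ok]
      split_ifs with h1
      · constructor
        · intro _ i hi1 hi2; omega
        · intro _; trivial
      · have hlt : lo + 2 ≤ hi := by omega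
        simp only [Bool.and_eq_true, decide_eq_true_iff]
        rw [ih lo ((lo + hi) / 2) (by omega), ih ((lo + hi) / 2) hi (by omega)]
        constructor
        · rintro ⟨⟨h2, h3⟩, h4⟩ i hlo hhi
          rcases lt_trichotomy i ((lo + hi) / 2) with hc | hc | hc
          · exact h2 i hlo hc
          · subst hc; exact h4
          · exact h3 i hc hhi
        · intro hall
          exact ⟨⟨fun i a b => hall i a (by omega), fun i a b => hall i (by omega) b⟩,
            hall ((lo + hi) / 2) (by omega) (by omega)⟩

-- ===== VERDICT (by name: the statements are the Claim_ definitions above) =====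
theorem all_decreasing_spec : Claim_equal_all_decreasing := by
  intro numbers _ hpre
  match numbers, hpre with
  | x :: xs, _ =>
    show all_decreasing (x :: xs) = all_decreasing_alt (x :: xs)
    have hA : all_decreasing (x :: xs)
        = ((x :: xs).zip xs).all (fun p => decide (1 ≤ p.1 - p.2 ∧ p.1 - p.2 ≤ 3)) := by
      simp only [all_decreasing, PySem.List.pyGet?_zero_cons]
      rw [all_decreasing_go_eq, List.zip_cons_cons, List.all_cons]
      have h' : 1 ≤ (x + 1) - x ∧ (x + 1) - x ≤ 3 := by omega
      rw [decide_eq_true h', Bool.true_and]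
    have h1 := zip_all_iff (x :: xs)
    have h2 := ok_iff (x :: xs) (x :: xs).length 0 (x :: xs).length (by omega)
    rw [hA, all_decreasing_alt]
    simp only [List.tail_cons] at h1
    exact Bool.eq_iff_iff.mpr (h1.trans h2.symm)
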